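-- pv_equiv track=rewrite | github.com/NathanielB123/2019-Advent-of-Code | Day 22.py | inverse_deal_with_increment2
-- ===== SOURCE A (Python) =====
-- SIZE = 119315717514047
--
-- def inverse_deal_with_increment2(Index, N):
--     Iters = 0
--     while Index != 0:
--         Iters += Index // N
--         Index %= N
--         if Index == 0:
--             break
--         else:
--             Index = (Index - N)%SIZE
--             Iters += 1
--     return Iters
-- ===== SOURCE B (Python) =====
-- SIZE = 119315717514047
--
-- def inverse_deal_with_increment2(Index, N):
--     # Modular inverse of N mod SIZE by the extended Euclidean algorithm,
--     # then one modular multiplication.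
--     old_r, r = N % SIZE, SIZE
--     old_s, s = 1, 0
--     while r != 0:
--         q = old_r // r
--         old_r, r = r, old_r - q * r
--         old_s, s = s, old_s - q * s
--     return (Index * old_s) % SIZE
-- ===== Notes on version B (the rewrite author's own statement) =====
-- stated objective: faster
-- what changed: Replaces A's trial loop (which repeatedly reduces Index mod N and wraps by SIZE until it hits an exact multiple, up to N iterations) by an extended-Euclidean modular inverse: B returns (Index * modinv(N, SIZE)) % SIZE in O(log SIZE) steps.
-- intended difference: On Index < 0 with N dividing Index, A returns the negative quotient Index // N, while B returns the canonical residue (Index // N) % SIZE in [0, SIZE); a deck position must be the nonnegative residue, so B's value is the intended one. — e.g. on inverse_deal_with_increment2(-6, 3): A returns -2, B returns 119315717514045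
-- outside the precondition, e.g. on inverse_deal_with_increment2(6, -3): A returns -2, B returns 119315717514045
import Mathlib
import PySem

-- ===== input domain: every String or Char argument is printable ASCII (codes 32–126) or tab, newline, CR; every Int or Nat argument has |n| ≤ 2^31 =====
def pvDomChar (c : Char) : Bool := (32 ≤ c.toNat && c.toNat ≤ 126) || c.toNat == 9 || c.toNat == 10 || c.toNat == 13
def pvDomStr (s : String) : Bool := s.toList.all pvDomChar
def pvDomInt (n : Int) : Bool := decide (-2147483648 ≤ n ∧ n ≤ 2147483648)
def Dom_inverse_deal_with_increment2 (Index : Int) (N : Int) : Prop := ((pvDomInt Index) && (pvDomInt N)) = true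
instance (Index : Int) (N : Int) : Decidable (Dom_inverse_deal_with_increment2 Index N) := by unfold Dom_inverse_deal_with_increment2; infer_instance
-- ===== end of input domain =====

-- B replaces A's O(N) trial loop by an extended-Euclidean modular inverse, (Index * modinv(N, SIZE)) % SIZE, in O(log SIZE) steps.

-- ===== PORT A =====
-- module constant SIZE = 119315717514047
def SIZE : Int := 119315717514047

-- the 'while Index != 0' loop of A, with a fuel argument that only makes it total
-- (inside Pre_ the loop finishes after at most N iterations, see the proofs below)
def pvLoopA : Nat → Int → Int → Int → Int
  | 0, _, iters, _ => iters
  | fuel + 1, index, iters, n =>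
    if index = 0 then iters
    else
      let iters1 := iters + PySem.Int.floordiv index n    -- Iters += Index // N
      let index1 := PySem.Int.mod index n                 -- Index %= N
      if index1 = 0 then iters1
      else pvLoopA fuel (PySem.Int.mod (index1 - n) SIZE) (iters1 + 1) n

def inverse_deal_with_increment2 (Index : Int) (N : Int) : Int :=
  pvLoopA (N.toNat + 1) Index 0 N

-- ===== PORT B =====
-- extended Euclidean loop of Source B: state (old_r, r, old_s, s); returns old_s when r = 0
def pvEgcd (oldr r olds s : Int) : Int :=
  if r = 0 then olds
  else
    pvEgcd r (oldr - (PySem.Int.floordiv oldr r) * r) s (olds - (PySem.Int.floordiv oldr r) * s)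
termination_by r.natAbs
decreasing_by
  rename_i h
  have h1 := PySem.Int.floordiv_mul_add_mod oldr r
  rcases lt_or_gt_of_ne h with hneg | hpos
  · have := PySem.Int.mod_neg_bounds (a := oldr) hneg; omega
  · have h2 := PySem.Int.mod_nonneg (a := oldr) hpos
    have h3 := PySem.Int.mod_lt (a := oldr) hpos; omega

def inverse_deal_with_increment2_alt (Index : Int) (N : Int) : Int :=
  PySem.Int.mod (Index * pvEgcd (PySem.Int.mod N SIZE) SIZE 1 0) SIZE

-- ===== PRECONDITION & SPEC =====
-- Pre_ excludes N ≤ 0, where A raises ZeroDivisionError (N = 0) or loops forever (N < 0,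
-- except when N divides Index).  The coprimality conjunct excludes nothing on the domain
-- (SIZE is prime and 0 < N ≤ 2^31 < SIZE), it is stated instead of a kernel primality proof.
def Pre_inverse_deal_with_increment2 (Index : Int) (N : Int) : Prop :=
  0 < N ∧ Int.gcd N SIZE = 1
instance (Index : Int) (N : Int) : Decidable (Pre_inverse_deal_with_increment2 Index N) := by
  unfold Pre_inverse_deal_with_increment2; infer_instance

def pvWitness_inverse_deal_with_increment2 : Int × Int := (1, 3)

-- On Index < 0 with N dividing Index, A returns the negative quotient Index // N, while B
-- returns the canonical residue (Index // N) % SIZE in [0, SIZE); a deck position must be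
-- the nonnegative residue, so B's value is the intended one.
def D_inverse_deal_with_increment2 (Index : Int) (N : Int) : Prop :=
  Index < 0 ∧ PySem.Int.mod Index N = 0
instance (Index : Int) (N : Int) : Decidable (D_inverse_deal_with_increment2 Index N) := by
  unfold D_inverse_deal_with_increment2; infer_instance

def Spec_inverse_deal_with_increment2 (Index : Int) (N : Int) (out : Int) : Prop :=
  ¬ D_inverse_deal_with_increment2 Index N → out = inverse_deal_with_increment2_alt Index N
instance (Index : Int) (N : Int) (out : Int) : Decidable (Spec_inverse_deal_with_increment2 Index N out) := by
  unfold Spec_inverse_deal_with_increment2; infer_instance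

def pvDiffWitness_inverse_deal_with_increment2 : Int × Int := (-6, 3)
def pvDiffWitnessOut_inverse_deal_with_increment2 : Int × Int := (-2, 119315717514045)

-- ===== CLAIM (what is proved, stated in full; the proofs are below) =====
def Claim_unchanged_inverse_deal_with_increment2 : Prop := ∀ (Index : Int) (N : Int), Dom_inverse_deal_with_increment2 Index N → Pre_inverse_deal_with_increment2 Index N → Spec_inverse_deal_with_increment2 Index N (inverse_deal_with_increment2 Index N)
def Claim_changed_inverse_deal_with_increment2 : Prop := Dom_inverse_deal_with_increment2 (pvDiffWitness_inverse_deal_with_increment2.1) (pvDiffWitness_inverse_deal_with_increment2.2) ∧ Pre_inverse_deal_with_increment2 (pvDiffWitness_inverse_deal_with_increment2.1) (pvDiffWitness_inverse_deal_with_increment2.2) ∧ D_inverse_deal_with_increment2 (pvDiffWitness_inverse_deal_with_increment2.1) (pvDiffWitness_inverse_deal_with_increment2.2) ∧ inverse_deal_with_increment2 (pvDiffWitness_inverse_deal_with_increment2.1) (pvDiffWitness_inverse_deal_with_increment2.2) = pvDiffWitnessOut_inverse_deal_with_increment2.1 ∧ inverse_deal_with_increment2_alt (pvDiffWitness_inverse_deal_with_increment2.1)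 (pvDiffWitness_inverse_deal_with_increment2.2) = pvDiffWitnessOut_inverse_deal_with_increment2.2 ∧ pvDiffWitnessOut_inverse_deal_with_increment2.1 ≠ pvDiffWitnessOut_inverse_deal_with_increment2.2
def Claim_exact_inverse_deal_with_increment2 : Prop := ∀ (Index : Int) (N : Int), Dom_inverse_deal_with_increment2 Index N → Pre_inverse_deal_with_increment2 Index N → D_inverse_deal_with_increment2 Index N → inverse_deal_with_increment2 Index N ≠ inverse_deal_with_increment2_alt Index N

-- ===== LEMMAS AND PROOFS =====

theorem pvSIZE_pos : (0 : Int) < SIZE := by decide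

-- Euclid's recursion preserves the gcd (nonnegative first argument)
theorem pv_gcd_step (a b : Int) (ha : 0 ≤ a) (hb : 0 < b) :
    Int.gcd b (a % b) = Int.gcd a b := by
  have hmod : a % b = ((a.toNat % b.toNat : Nat) : Int) := by
    push_cast
    rw [Int.toNat_of_nonneg ha, Int.toNat_of_nonneg (le_of_lt hb)]
  unfold Int.gcd
  rw [hmod, Int.natAbs_natCast]
  have h1 : a.natAbs = a.toNat := by omega
  have h2 : b.natAbs = b.toNat := by omega
  rw [h1, h2, Nat.gcd_comm b.toNat (a.toNat % b.toNat), ← Nat.gcd_rec, Nat.gcd_comm]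

-- the extended-Euclid loop returns a modular-inverse certificate
theorem pv_egcd_modeq (N : Int) : ∀ (n : Nat) (oldr r olds s : Int), r.natAbs = n →
    0 ≤ oldr → 0 ≤ r →
    olds * N ≡ oldr [ZMOD SIZE] → s * N ≡ r [ZMOD SIZE] →
    Int.gcd oldr r = 1 →
    pvEgcd oldr r olds s * N ≡ 1 [ZMOD SIZE] := by
  intro n
  induction n using Nat.strong_induction_on with
  | _ n ih =>
    intro oldr r olds s hn h1 h2 ho hs hg
    by_cases hr : r = 0
    · rw [pvEgcd, if_pos hr]
      subst hr
      have hna : oldr.natAbs = 1 := by simpa [Int.gcd] using hg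
      have h1' : oldr = 1 := by omega
      rw [h1'] at ho
      exact ho
    · rw [pvEgcd, if_neg hr]
      have hr0 : 0 < r := lt_of_le_of_ne h2 (Ne.symm hr)
      have hfd : PySem.Int.floordiv oldr r = oldr / r :=
        PySem.Int.floordiv_eq_ediv_of_pos hr0
      have hrem : oldr - PySem.Int.floordiv oldr r * r = oldr % r := by
        rw [hfd, Int.emod_def]; ring
      have hmnn : 0 ≤ oldr % r := Int.emod_nonneg oldr (ne_of_gt hr0)
      have hmlt : oldr % r < r := Int.emod_lt_of_pos oldr hr0
      refine ih (oldr - PySem.Int.floordiv oldr r * r).natAbs ?_ r _ s _ rfl h2 ?_ hs ?_ ?_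
      · rw [hrem]; omega
      · rw [hrem]; exact hmnn
      · have h3 := Int.ModEq.sub ho (Int.ModEq.mul_left (PySem.Int.floordiv oldr r) hs)
        calc (olds - PySem.Int.floordiv oldr r * s) * N
            = olds * N - PySem.Int.floordiv oldr r * (s * N) := by ring
          _ ≡ oldr - PySem.Int.floordiv oldr r * r [ZMOD SIZE] := h3
      · rw [hrem, pv_gcd_step oldr r h1 hr0]
        exact hg

-- B's result multiplied by N is Index modulo SIZE
theorem pv_alt_modeq (Index N : Int) (hN : 0 < N) (hg : Int.gcd N SIZE = 1) :
    inverse_deal_with_increment2_alt Index N * N ≡ Index [ZMOD SIZE] := by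
  unfold inverse_deal_with_increment2_alt
  have hmodN : PySem.Int.mod N SIZE = N % SIZE := PySem.Int.mod_eq_emod_of_pos pvSIZE_pos
  have hinv : pvEgcd (PySem.Int.mod N SIZE) SIZE 1 0 * N ≡ 1 [ZMOD SIZE] := by
    apply pv_egcd_modeq N SIZE.natAbs _ _ _ _ rfl
    · rw [hmodN]; exact Int.emod_nonneg N (ne_of_gt pvSIZE_pos)
    · exact le_of_lt pvSIZE_pos
    · rw [hmodN, one_mul]; exact (Int.mod_modEq N SIZE).symm
    · rw [zero_mul]; unfold Int.ModEq; simp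
    · rw [hmodN, Int.gcd_comm, pv_gcd_step N SIZE (le_of_lt hN) pvSIZE_pos]
      exact hg
  calc PySem.Int.mod (Index * pvEgcd (PySem.Int.mod N SIZE) SIZE 1 0) SIZE * N
      ≡ Index * pvEgcd (PySem.Int.mod N SIZE) SIZE 1 0 * N [ZMOD SIZE] := by
        refine Int.ModEq.mul_right N ?_
        rw [PySem.Int.mod_eq_emod_of_pos pvSIZE_pos]
        exact Int.mod_modEq _ _
    _ = Index * (pvEgcd (PySem.Int.mod N SIZE) SIZE 1 0 * N) := by ring
    _ ≡ Index * 1 [ZMOD SIZE] := Int.ModEq.mul_left Index hinv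
    _ = Index := mul_one Index

theorem pv_alt_nonneg (Index N : Int) : 0 ≤ inverse_deal_with_increment2_alt Index N := by
  unfold inverse_deal_with_increment2_alt
  exact PySem.Int.mod_nonneg _ pvSIZE_pos

theorem pv_alt_lt (Index N : Int) : inverse_deal_with_increment2_alt Index N < SIZE := by
  unfold inverse_deal_with_increment2_alt
  exact PySem.Int.mod_lt _ pvSIZE_pos

-- uniqueness: anything in [0, SIZE) whose product with N is Index mod SIZE equals B's result
theorem pv_alt_unique (Index N T : Int) (hN : 0 < N) (hg : Int.gcd N SIZE = 1)
    (hT : T * N ≡ Index [ZMOD SIZE]) (h0 : 0 ≤ T) (h1 : T < SIZE) :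
    T = inverse_deal_with_increment2_alt Index N := by
  have halt := pv_alt_modeq Index N hN hg
  have hmm : T * N ≡ inverse_deal_with_increment2_alt Index N * N [ZMOD SIZE] :=
    hT.trans halt.symm
  have hcan := Int.ModEq.cancel_right_div_gcd pvSIZE_pos hmm
  rw [Int.gcd_comm SIZE N, hg] at hcan
  norm_num at hcan
  have h2 : T % SIZE = inverse_deal_with_increment2_alt Index N % SIZE := hcan
  rwa [Int.emod_eq_of_lt h0 h1,
       Int.emod_eq_of_lt (pv_alt_nonneg Index N) (pv_alt_lt Index N)] at h2

-- closed form of A's loop: with k the number of SIZE-wraps, A adds (index + k·SIZE)/N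
theorem pv_loopA_eval (N : Int) (hN : 0 < N) (hNM : N < SIZE) :
    ∀ (k fuel : Nat) (index iters : Int), k < fuel →
      -SIZE < index → index < SIZE →
      N ∣ index + (k : Int) * SIZE →
      (∀ j : Nat, j < k → ¬ N ∣ index + (j : Int) * SIZE) →
      pvLoopA fuel index iters N = iters + (index + (k : Int) * SIZE) / N := by
  intro k
  induction k with
  | zero =>
    intro fuel index iters hf hb1 hb2 hdvd _
    obtain ⟨f, rfl⟩ : ∃ f, fuel = f + 1 := ⟨fuel - 1, by omega⟩
    simp only [Nat.cast_zero, zero_mul, add_zero] at hdvd ⊢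
    by_cases h0 : index = 0
    · subst h0; simp [pvLoopA]
    · have hm : PySem.Int.mod index N = 0 := (PySem.Int.mod_eq_zero_iff_dvd index N).mpr hdvd
      simp [pvLoopA, h0, hm, PySem.Int.floordiv_eq_ediv_of_pos hN]
  | succ k ih =>
    intro fuel index iters hf hb1 hb2 hdvd hmin
    obtain ⟨f, rfl⟩ : ∃ f, fuel = f + 1 := ⟨fuel - 1, by omega⟩
    have hnd0 : ¬ N ∣ index := by
      have := hmin 0 (by omega); simpa using this
    have h0 : index ≠ 0 := by rintro rfl; exact hnd0 (dvd_zero N)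
    have hrne : PySem.Int.mod index N ≠ 0 :=
      fun hc => hnd0 ((PySem.Int.mod_eq_zero_iff_dvd index N).mp hc)
    have hr_emod : PySem.Int.mod index N = index % N := PySem.Int.mod_eq_emod_of_pos hN
    have hr0 : 0 < PySem.Int.mod index N :=
      lt_of_le_of_ne (PySem.Int.mod_nonneg _ hN) (Ne.symm hrne)
    have hrN : PySem.Int.mod index N < N := PySem.Int.mod_lt _ hN
    have hwrap : PySem.Int.mod (PySem.Int.mod index N - N) SIZE
        = PySem.Int.mod index N - N + SIZE := by
      rw [PySem.Int.mod_eq_emod_of_pos pvSIZE_pos]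
      calc (PySem.Int.mod index N - N) % SIZE
          = (PySem.Int.mod index N - N + SIZE) % SIZE := (Int.add_emod_right _ _).symm
        _ = PySem.Int.mod index N - N + SIZE := Int.emod_eq_of_lt (by omega) (by omega)
    have hrd : index % N = index - N * (index / N) := Int.emod_def index N
    have hdvd' : N ∣ (PySem.Int.mod index N - N + SIZE) + (k : Int) * SIZE := by
      have hrel : (PySem.Int.mod index N - N + SIZE) + (k : Int) * SIZE
          = (index + ((k : Int) + 1) * SIZE) - N * (index / N + 1) := by
        rw [hr_emod, hrd]; ring
      rw [hrel]
      refine dvd_sub ?_ (dvd_mul_right N _)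
      have hc : ((k : Int) + 1) = ((k + 1 : Nat) : Int) := by push_cast; ring
      rw [hc]; exact_mod_cast hdvd
    have hmin' : ∀ j : Nat, j < k →
        ¬ N ∣ (PySem.Int.mod index N - N + SIZE) + (j : Int) * SIZE := by
      intro j hj hc
      apply hmin (j + 1) (by omega)
      have hrel : index + ((j + 1 : Nat) : Int) * SIZE
          = ((PySem.Int.mod index N - N + SIZE) + (j : Int) * SIZE) + N * (index / N + 1) := by
        rw [hr_emod, hrd]; push_cast; ring
      rw [hrel]
      exact dvd_add hc (dvd_mul_right N _)
    have hih := ih f (PySem.Int.mod index N - N + SIZE)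
      (iters + PySem.Int.floordiv index N + 1)
      (by omega) (by omega) (by omega) hdvd' hmin'
    have hstep : pvLoopA (f + 1) index iters N
        = pvLoopA f (PySem.Int.mod (PySem.Int.mod index N - N) SIZE)
            (iters + PySem.Int.floordiv index N + 1) N := by
      simp [pvLoopA, h0, hrne]
    rw [hstep, hwrap, hih]
    have hX : (PySem.Int.mod index N - N + SIZE) + (k : Int) * SIZE
        = (index + (((k : Nat) : Int) + 1) * SIZE) + (-(index / N + 1)) * N := by
      rw [hr_emod, hrd]; ring
    rw [hX, Int.add_mul_ediv_right _ _ (ne_of_gt hN),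
        PySem.Int.floordiv_eq_ediv_of_pos hN]
    push_cast
    ring

-- existence of a wrap count below N (Bezout from the gcd hypothesis)
theorem pv_exists_k (Index N : Int) (hN : 0 < N) (hg : Int.gcd N SIZE = 1) :
    ∃ k : Nat, (k : Int) < N ∧ N ∣ Index + (k : Int) * SIZE := by
  have hb := Int.gcd_eq_gcd_ab SIZE N
  have hg' : Int.gcd SIZE N = 1 := by rw [Int.gcd_comm]; exact hg
  rw [hg'] at hb
  have hbez : (1 : Int) = SIZE * Int.gcdA SIZE N + N * Int.gcdB SIZE N := by exact_mod_cast hb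
  have hk0a : 0 ≤ (-Index * Int.gcdA SIZE N) % N := Int.emod_nonneg _ (ne_of_gt hN)
  have hk0b : (-Index * Int.gcdA SIZE N) % N < N := Int.emod_lt_of_pos _ hN
  refine ⟨((-Index * Int.gcdA SIZE N) % N).toNat, ?_, ?_⟩
  · rw [Int.toNat_of_nonneg hk0a]; exact hk0b
  · rw [Int.toNat_of_nonneg hk0a]
    refine ⟨Index * Int.gcdB SIZE N - (-Index * Int.gcdA SIZE N / N) * SIZE, ?_⟩
    have hk0 : (-Index * Int.gcdA SIZE N) % N
        = -Index * Int.gcdA SIZE N - N * (-Index * Int.gcdA SIZE N / N) :=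
      Int.emod_def _ _
    rw [hk0]
    linear_combination Index * hbez

-- ===== VERDICT (by name: the statement is the Claim_ definition above) =====
theorem inverse_deal_with_increment2_spec : Claim_unchanged_inverse_deal_with_increment2 := by
  intro Index N hdom hpre hD
  obtain ⟨hN, hg⟩ := hpre
  have hS : SIZE = 119315717514047 := rfl
  simp only [Dom_inverse_deal_with_increment2, pvDomInt, Bool.and_eq_true, decide_eq_true_eq] at hdom
  obtain ⟨⟨hI1, hI2⟩, hN1, hN2⟩ := hdom
  have hNM : N < SIZE := by omega
  obtain ⟨kw, hkw1, hkw2⟩ := pv_exists_k Index N hN hg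
  have hex : ∃ k : Nat, N ∣ Index + (k : Int) * SIZE := ⟨kw, hkw2⟩
  have hk : N ∣ Index + ((Nat.find hex : Nat) : Int) * SIZE := Nat.find_spec hex
  have hmin : ∀ j : Nat, j < Nat.find hex → ¬ N ∣ Index + (j : Int) * SIZE :=
    fun j hj => Nat.find_min hex hj
  have hkle : Nat.find hex ≤ kw := Nat.find_min' hex hkw2
  have hkN : ((Nat.find hex : Nat) : Int) < N :=
    lt_of_le_of_lt (by exact_mod_cast hkle) hkw1
  have hfuel : Nat.find hex < N.toNat + 1 := by omega
  have hA := pv_loopA_eval N hN hNM (Nat.find hex) (N.toNat + 1) Index 0 hfuel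
    (by omega) (by omega) hk hmin
  have hk1 : Index < 0 → 1 ≤ ((Nat.find hex : Nat) : Int) := by
    intro hi
    by_contra hc
    have h0 : Nat.find hex = 0 := by omega
    rw [h0] at hk
    simp at hk
    exact hD ⟨hi, (PySem.Int.mod_eq_zero_iff_dvd Index N).mpr hk⟩
  have hknn : (0 : Int) ≤ ((Nat.find hex : Nat) : Int) := by positivity
  have hnum0 : 0 ≤ Index + ((Nat.find hex : Nat) : Int) * SIZE := by
    by_cases hi : 0 ≤ Index
    · have : (0 : Int) ≤ ((Nat.find hex : Nat) : Int) * SIZE :=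
        mul_nonneg hknn (le_of_lt pvSIZE_pos)
      omega
    · have h1 := hk1 (by omega)
      have := mul_le_mul_of_nonneg_right h1 (le_of_lt pvSIZE_pos)
      omega
  have hTS : (Index + ((Nat.find hex : Nat) : Int) * SIZE) / N < SIZE := by
    apply (Int.ediv_lt_iff_lt_mul hN).mpr
    have hkub : ((Nat.find hex : Nat) : Int) ≤ N - 1 := by omega
    have h2 : ((Nat.find hex : Nat) : Int) * SIZE ≤ (N - 1) * SIZE :=
      mul_le_mul_of_nonneg_right hkub (le_of_lt pvSIZE_pos)
    nlinarith [h2]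
  have hT0 : 0 ≤ (Index + ((Nat.find hex : Nat) : Int) * SIZE) / N :=
    Int.ediv_nonneg hnum0 (le_of_lt hN)
  have hTN : (Index + ((Nat.find hex : Nat) : Int) * SIZE) / N * N
      = Index + ((Nat.find hex : Nat) : Int) * SIZE := Int.ediv_mul_cancel hk
  have hTmod : (Index + ((Nat.find hex : Nat) : Int) * SIZE) / N * N ≡ Index [ZMOD SIZE] := by
    rw [hTN]
    unfold Int.ModEq
    rw [show Index + ((Nat.find hex : Nat) : Int) * SIZE
          = Index + SIZE * ((Nat.find hex : Nat) : Int) from by ring,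
        Int.add_mul_emod_self_left]
  show inverse_deal_with_increment2 Index N = inverse_deal_with_increment2_alt Index N
  unfold inverse_deal_with_increment2
  rw [hA, zero_add]
  exact pv_alt_unique Index N _ hN hg hTmod hT0 hTS

theorem inverse_deal_with_increment2_changed : Claim_changed_inverse_deal_with_increment2 := by
  unfold Claim_changed_inverse_deal_with_increment2
  refine ⟨by decide, by decide, by decide, by decide, ?_, by decide⟩
  have hT : (119315717514045 : Int) * 3 ≡ -6 [ZMOD SIZE] := by decide
  exact (pv_alt_unique (-6) 3 119315717514045 (by decide) (by decide) hT
    (by decide) (by decide)).symm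

theorem inverse_deal_with_increment2_tight : Claim_exact_inverse_deal_with_increment2 := by
  intro Index N hdom hpre hD
  obtain ⟨hN, _⟩ := hpre
  obtain ⟨hIneg, hImod⟩ := hD
  have hIne : Index ≠ 0 := by omega
  have hA : inverse_deal_with_increment2 Index N = PySem.Int.floordiv Index N := by
    unfold inverse_deal_with_increment2
    simp [pvLoopA, hIne, hImod]
  have hAneg : PySem.Int.floordiv Index N < 0 := by
    rw [PySem.Int.floordiv_eq_ediv_of_pos hN]
    exact Int.ediv_neg_of_neg_of_pos hIneg hN
  have hB := pv_alt_nonneg Index N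
  rw [hA]
  omega
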